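-- pv_equiv track=rewrite | github.com/yogeshjadhav7/Led7 | generate_all_cases.py | create_extra_features
-- ===== SOURCE A (Python) =====
-- def create_extra_features(state):
--     length = len(state)
--     for i in range(length):
--         if state[i] == ',':
--             continue
--
--         j = i + 1
--         while j < length:
--             if state[j] == ',':
--                 j = j + 1
--                 continue
--
--             if state[i] == '0' or state[j] == '0':
--                 state = state + ",0"
--             else:
--                 state = state + ",1"
--
--             j = j + 1
--
--     return state
-- ===== SOURCE B (Python) =====
-- def create_extra_features(state):
--     chars = [c for c in state if c != ',']
--     pieces = []
--     rest = chars
--     while rest: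
--         c, rest = rest[0], rest[1:]
--         for d in rest:
--             pieces.append(',0' if c == '0' or d == '0' else ',1')
--     return state + ''.join(pieces)
-- ===== Notes on version B (the rewrite author's own statement) =====
-- stated objective: simpler
-- what changed: B first filters out commas in one pass, then walks the filtered list head-vs-tail appending each pair's feature to a buffer joined once at the end, removing A's index arithmetic, comma-skipping continue branches and repeated string concatenation.
import Mathlib
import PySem

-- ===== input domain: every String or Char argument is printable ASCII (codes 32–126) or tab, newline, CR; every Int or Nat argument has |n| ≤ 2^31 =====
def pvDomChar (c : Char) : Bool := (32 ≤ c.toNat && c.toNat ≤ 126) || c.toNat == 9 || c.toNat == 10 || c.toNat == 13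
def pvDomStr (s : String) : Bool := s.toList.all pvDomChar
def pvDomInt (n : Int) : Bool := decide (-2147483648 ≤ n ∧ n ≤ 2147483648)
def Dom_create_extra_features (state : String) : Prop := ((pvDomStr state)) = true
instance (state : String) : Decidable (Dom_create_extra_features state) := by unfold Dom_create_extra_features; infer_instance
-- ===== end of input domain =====

-- B keeps the same result but hoists the comma filter into one pass and joins a buffer once,
-- instead of A's index loops with comma-skipping continue branches and repeated concatenation.

-- ===== PORT A =====
-- inner 'while j < length' loop of A; fuel = length bounds the remaining iterations (structural
-- recursion so the kernel can evaluate); state only grows, so the reads stay in range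
def pvAInner (length i : Nat) : Nat → Nat → List Char → List Char
  | 0, _, st => st        -- fuel exhausted: never reached when called with fuel ≥ length - j
  | fuel + 1, j, st =>
    if j < length then
      match PySem.List.pyGet? st (j : Int) with
      | none => st        -- unreachable: j < length ≤ st.length (Python would raise IndexError)
      | some cj =>
        if cj = ',' then pvAInner length i fuel (j + 1) st
        else
          match PySem.List.pyGet? st (i : Int) with
          | none => st    -- unreachable for i < length
          | some ci =>
            if ci = '0' ∨ cj = '0' then pvAInner length i fuel (j + 1) (st ++ [',', '0'])
            else pvAInner length i fuel (j + 1) (st ++ [',', '1'])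
    else st

-- outer 'for i in range(length)' loop of A, same fuel pattern
def pvAOuter (length : Nat) : Nat → Nat → List Char → List Char
  | 0, _, st => st
  | fuel + 1, i, st =>
    if i < length then
      match PySem.List.pyGet? st (i : Int) with
      | none => st        -- unreachable
      | some ci =>
        if ci = ',' then pvAOuter length fuel (i + 1) st
        else pvAOuter length fuel (i + 1) (pvAInner length i length (i + 1) st)
    else st

def create_extra_features (state : String) : String :=
  String.ofList (pvAOuter state.toList.length state.toList.length 0 state.toList)

-- ===== PORT B =====
-- 'while rest: c, rest = rest[0], rest[1:]; for d in rest: pieces.append(…)'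
def pvPieces : List Char → List Char
  | [] => []
  | c :: rest =>
      (rest.map (fun d => if c = '0' ∨ d = '0' then [',', '0'] else [',', '1'])).flatten
        ++ pvPieces rest

def create_extra_features_alt (state : String) : String :=
  String.ofList (state.toList ++ pvPieces (state.toList.filter (fun c => c ≠ ',')))

-- ===== PRECONDITION & SPEC =====
def Spec_create_extra_features (state : String) (out : String) : Prop := out = create_extra_features_alt state
instance (state : String) (out : String) : Decidable (Spec_create_extra_features state out) := by unfold Spec_create_extra_features; infer_instance

-- ===== CLAIM (what is proved, stated in full; the proofs are below) =====
def Claim_equal_create_extra_features : Prop := ∀ (state : String), Dom_create_extra_features state → Spec_create_extra_features state (create_extra_features state)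

-- ===== LEMMAS AND PROOFS =====

-- the feature appended for a pair of non-comma characters
def pvPiece (c d : Char) : List Char := if c = '0' ∨ d = '0' then [',', '0'] else [',', '1']

lemma pvPieces_cons (c : Char) (rest : List Char) :
    pvPieces (c :: rest) = (rest.map (pvPiece c)).flatten ++ pvPieces rest := rfl

-- reads below the original length see the original characters
lemma pvGet_append (orig acc : List Char) (k : Nat) (hk : k < orig.length) :
    PySem.List.pyGet? (orig ++ acc) (k : Int) = some orig[k] := by
  rw [PySem.List.pyGet?_natCast]
  rw [List.getElem?_append_left hk, List.getElem?_eq_getElem hk]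

lemma pvAInner_spec (orig : List Char) (i : Nat) (hi : i < orig.length) :
    ∀ (fuel j : Nat), orig.length ≤ fuel + j → ∀ (acc : List Char),
      pvAInner orig.length i fuel j (orig ++ acc) =
        orig ++ acc ++ (((orig.drop j).filter (fun c => c ≠ ',')).map (pvPiece orig[i])).flatten := by
  intro fuel
  induction fuel with
  | zero =>
    intro j hn acc
    have hd : orig.drop j = [] := List.drop_eq_nil_of_le (by omega)
    simp [pvAInner, hd]
  | succ fuel ih =>
    intro j hn acc
    rw [pvAInner]
    by_cases hj : j < orig.length
    · rw [if_pos hj]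
      rw [pvGet_append orig acc j hj]
      dsimp only
      have hdrop : orig.drop j = orig[j] :: orig.drop (j + 1) :=
        List.drop_eq_getElem_cons hj
      by_cases hc : orig[j] = ','
      · rw [if_pos hc]
        rw [ih (j + 1) (by omega) acc]
        have hb : decide (orig[j] ≠ ',') = false := by simp [hc]
        rw [hdrop, List.filter_cons, hb]
        simp
      · rw [if_neg hc]
        rw [pvGet_append orig acc i hi]
        dsimp only
        have hb : decide (orig[j] ≠ ',') = true := by simp [hc]
        by_cases h0 : orig[i] = '0' ∨ orig[j] = '0'
        · rw [if_pos h0]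
          have hp : pvPiece orig[i] orig[j] = [',', '0'] := by unfold pvPiece; rw [if_pos h0]
          rw [show orig ++ acc ++ [',', '0'] = orig ++ (acc ++ [',', '0']) by simp]
          rw [ih (j + 1) (by omega) (acc ++ [',', '0'])]
          rw [hdrop, List.filter_cons, hb]
          simp [hp]
        · rw [if_neg h0]
          have hp : pvPiece orig[i] orig[j] = [',', '1'] := by unfold pvPiece; rw [if_neg h0]
          rw [show orig ++ acc ++ [',', '1'] = orig ++ (acc ++ [',', '1']) by simp]
          rw [ih (j + 1) (by omega) (acc ++ [',', '1'])]
          rw [hdrop, List.filter_cons, hb]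
          simp [hp]
    · rw [if_neg hj]
      have hd : orig.drop j = [] := List.drop_eq_nil_of_le (by omega)
      simp [hd]

lemma pvAOuter_spec (orig : List Char) :
    ∀ (fuel i : Nat), orig.length ≤ fuel + i → ∀ (acc : List Char),
      pvAOuter orig.length fuel i (orig ++ acc) =
        orig ++ acc ++ pvPieces ((orig.drop i).filter (fun c => c ≠ ',')) := by
  intro fuel
  induction fuel with
  | zero =>
    intro i hn acc
    have hd : orig.drop i = [] := List.drop_eq_nil_of_le (by omega)
    simp [pvAOuter, hd, pvPieces]
  | succ fuel ih =>
    intro i hn acc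
    rw [pvAOuter]
    by_cases hi : i < orig.length
    · rw [if_pos hi]
      rw [pvGet_append orig acc i hi]
      dsimp only
      have hdrop : orig.drop i = orig[i] :: orig.drop (i + 1) :=
        List.drop_eq_getElem_cons hi
      by_cases hc : orig[i] = ','
      · rw [if_pos hc]
        rw [ih (i + 1) (by omega) acc]
        have hb : decide (orig[i] ≠ ',') = false := by simp [hc]
        rw [hdrop, List.filter_cons, hb]
        simp
      · rw [if_neg hc]
        rw [pvAInner_spec orig i hi orig.length (i + 1) (by omega) acc]
        rw [show orig ++ acc ++ (((orig.drop (i+1)).filter (fun c => c ≠ ',')).map (pvPiece orig[i])).flatten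
              = orig ++ (acc ++ (((orig.drop (i+1)).filter (fun c => c ≠ ',')).map (pvPiece orig[i])).flatten) by simp]
        rw [ih (i + 1) (by omega)]
        have hb : decide (orig[i] ≠ ',') = true := by simp [hc]
        rw [hdrop, List.filter_cons, hb]
        simp [pvPieces_cons]
    · rw [if_neg hi]
      have hd : orig.drop i = [] := List.drop_eq_nil_of_le (by omega)
      simp [hd, pvPieces]

-- ===== VERDICT (by name: the statement is the Claim_ definition above) =====
theorem create_extra_features_spec : Claim_equal_create_extra_features := by
  intro state _
  unfold Spec_create_extra_features create_extra_features create_extra_features_alt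
  have := pvAOuter_spec state.toList state.toList.length 0 (by omega) []
  simpa using congrArg String.ofList this
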